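-- pv_equiv track=rewrite | github.com/jesusgonzalez-star/relix-tracking | utils/db_legacy.py | _translate_placeholders
-- ===== SOURCE A (Python) =====
-- def _translate_placeholders(sql: str) -> str:
--     """Convierte ``?`` (estilo qmark) a ``%s`` (estilo PyMySQL).
--
--     Respeta literales entre comillas simples/dobles para no tocar ``'?'``.
--     Duplica los ``%`` literales para que PyMySQL no los interprete.
--     """
--     if sql is None or ('?' not in sql and '%' not in sql):
--         return sql
--     out = []
--     i, n = 0, len(sql)
--     in_squote = False
--     in_dquote = False
--     while i < n:
--         ch = sql[i]
--         if ch == "'" and not in_dquote: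
--             in_squote = not in_squote
--             out.append(ch)
--         elif ch == '"' and not in_squote:
--             in_dquote = not in_dquote
--             out.append(ch)
--         elif in_squote or in_dquote:
--             out.append(ch)
--         elif ch == '?':
--             out.append('%s')
--         elif ch == '%':
--             out.append('%%')
--         else:
--             out.append(ch)
--         i += 1
--     return ''.join(out)
-- ===== SOURCE B (Python) =====
-- def _translate_placeholders(sql):
--     """Segment-based rewrite: consume whole quoted literals and whole
--     unquoted runs at once instead of a per-character flag machine."""
--     if sql is None or ('?' not in sql and '%' not in sql):
--         return sql
--     parts = []
--     i, n = 0, len(sql)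
--     while i < n:
--         ch = sql[i]
--         if ch in ("'", '"'):
--             j = sql.find(ch, i + 1)
--             if j == -1:
--                 parts.append(sql[i:])
--                 i = n
--             else:
--                 parts.append(sql[i:j + 1])
--                 i = j + 1
--         else:
--             j = i
--             while j < n and sql[j] not in ("'", '"'):
--                 j += 1
--             parts.append(sql[i:j].replace('%', '%%').replace('?', '%s'))
--             i = j
--     return ''.join(parts)
-- ===== Notes on version B (the rewrite author's own statement) =====
-- stated objective: alternative
-- what changed: Replaced the per-character while loop with two boolean quote flags by a segment consumer that swallows a whole quoted literal (via find/slice) or a whole unquoted run (rewritten with str.replace) per iteration.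
import Mathlib
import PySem

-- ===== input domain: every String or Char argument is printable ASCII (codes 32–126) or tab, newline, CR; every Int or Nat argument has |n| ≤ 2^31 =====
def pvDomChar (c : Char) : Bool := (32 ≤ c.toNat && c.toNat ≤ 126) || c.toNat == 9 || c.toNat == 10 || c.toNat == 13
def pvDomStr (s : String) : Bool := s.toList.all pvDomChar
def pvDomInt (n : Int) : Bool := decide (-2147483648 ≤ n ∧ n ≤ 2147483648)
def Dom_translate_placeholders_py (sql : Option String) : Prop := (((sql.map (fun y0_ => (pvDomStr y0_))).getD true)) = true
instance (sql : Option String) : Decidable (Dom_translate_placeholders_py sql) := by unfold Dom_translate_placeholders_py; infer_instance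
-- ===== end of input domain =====

-- B replaces A's per-character dual-flag state machine with a segment consumer
-- (whole quoted literals / unquoted runs at a time); objective: alternative.

-- ===== PORT A =====
-- the while loop of A: state = (in_squote, in_dquote), one character per step
def pvGoA : List Char → Bool → Bool → List Char
  | [], _, _ => []
  | c :: xs, sq, dq =>
    if c = '\'' && !dq then c :: pvGoA xs (!sq) dq
    else if c = '"' && !sq then c :: pvGoA xs sq (!dq)
    else if sq || dq then c :: pvGoA xs sq dq
    else if c = '?' then '%' :: 's' :: pvGoA xs sq dq
    else if c = '%' then '%' :: '%' :: pvGoA xs sq dq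
    else c :: pvGoA xs sq dq

def translate_placeholders_py (sql : Option String) : Option String :=
  match sql with
  | none => none
  | some s =>
    if !s.toList.contains '?' && !s.toList.contains '%' then some s
    else some (String.mk (pvGoA s.toList false false))

-- ===== PORT B =====
-- sql.find(ch, i+1) + slice: the literal's body up to (and including, if found)
-- the closing quote, and the remainder after it
def pvTakeLit (q : Char) (xs : List Char) : List Char × List Char :=
  match xs.dropWhile (· ≠ q) with
  | [] => (xs.takeWhile (· ≠ q), [])
  | _ :: t => (xs.takeWhile (· ≠ q) ++ [q], t)

-- token.replace('%','%%').replace('?','%s'), one character's contribution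
def pvRepl (c : Char) : List Char :=
  if c = '%' then ['%', '%'] else if c = '?' then ['%', 's'] else [c]

theorem pvTakeLit_len (q : Char) (xs : List Char) : (pvTakeLit q xs).2.length ≤ xs.length := by
  unfold pvTakeLit
  cases h : xs.dropWhile (· ≠ q) with
  | nil => simp
  | cons a t =>
    have := List.length_dropWhile_le (p := (· ≠ q)) (l := xs)
    simp only [h, List.length_cons] at this
    simpa using Nat.le_trans (Nat.le_succ t.length) this

-- the while loop of B: one whole segment per step
def pvGoB : List Char → List Char
  | [] => []
  | c :: xs =>
    if c = '\'' || c = '"' then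
      let p := pvTakeLit c xs
      c :: p.1 ++ pvGoB p.2
    else
      ((c :: xs).takeWhile (fun d => !(d = '\'' || d = '"'))).flatMap pvRepl
        ++ pvGoB ((c :: xs).dropWhile (fun d => !(d = '\'' || d = '"')))
termination_by xs => xs.length
decreasing_by
  · have := pvTakeLit_len c xs
    simp only [List.length_cons]; omega
  · rename_i hq
    have h1 : ((c :: xs).dropWhile (fun d => !(d = '\'' || d = '"'))) = xs.dropWhile (fun d => !(d = '\'' || d = '"')) := by
      rw [List.dropWhile_cons_of_pos]; simpa using hq
    rw [h1]
    have := List.length_dropWhile_le (p := (fun d : Char => !(d = '\'' || d = '"'))) (l := xs)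
    simp only [List.length_cons]; omega

def translate_placeholders_py_alt (sql : Option String) : Option String :=
  match sql with
  | none => none
  | some s =>
    if !s.toList.contains '?' && !s.toList.contains '%' then some s
    else some (String.mk (pvGoB s.toList))

-- ===== PRECONDITION & SPEC =====
def Spec_translate_placeholders_py (sql : Option String) (out : Option String) : Prop := out = translate_placeholders_py_alt sql
instance (sql : Option String) (out : Option String) : Decidable (Spec_translate_placeholders_py sql out) := by unfold Spec_translate_placeholders_py; infer_instance

-- ===== CLAIM (what is proved, stated in full; the proofs are below) =====
def Claim_equal_translate_placeholders_py : Prop := ∀ (sql : Option String), Dom_translate_placeholders_py sql → Spec_translate_placeholders_py sql (translate_placeholders_py sql)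

-- ===== LEMMAS AND PROOFS =====

-- inside a single-quoted literal, A copies verbatim until the closing quote
theorem pvGoA_squote (xs : List Char) :
    pvGoA xs true false = (pvTakeLit '\'' xs).1 ++ pvGoA (pvTakeLit '\'' xs).2 false false := by
  induction xs with
  | nil => simp [pvTakeLit, pvGoA]
  | cons c xs ih =>
    by_cases hc : c = '\''
    · subst hc
      simp [pvGoA, pvTakeLit, List.dropWhile, List.takeWhile]
    · have h1 : pvGoA (c :: xs) true false = c :: pvGoA xs true false := by
        simp [pvGoA, hc]
      unfold pvTakeLit
      rw [List.dropWhile_cons_of_pos (by simpa using hc),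
          List.takeWhile_cons_of_pos (by simpa using hc)]
      cases h : xs.dropWhile (· ≠ '\'') with
      | nil => simp only [h1, ih]; unfold pvTakeLit; rw [h]; simp
      | cons a t => simp only [h1, ih]; unfold pvTakeLit; rw [h]; simp

-- inside a double-quoted literal, A copies verbatim until the closing quote
theorem pvGoA_dquote (xs : List Char) :
    pvGoA xs false true = (pvTakeLit '"' xs).1 ++ pvGoA (pvTakeLit '"' xs).2 false false := by
  induction xs with
  | nil => simp [pvTakeLit, pvGoA]
  | cons c xs ih =>
    by_cases hc : c = '"'
    · subst hc
      simp [pvGoA, pvTakeLit, List.dropWhile, List.takeWhile]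
    · have h1 : pvGoA (c :: xs) false true = c :: pvGoA xs false true := by
        simp [pvGoA, hc]
      unfold pvTakeLit
      rw [List.dropWhile_cons_of_pos (by simpa using hc),
          List.takeWhile_cons_of_pos (by simpa using hc)]
      cases h : xs.dropWhile (· ≠ '"') with
      | nil => simp only [h1, ih]; unfold pvTakeLit; rw [h]; simp
      | cons a t => simp only [h1, ih]; unfold pvTakeLit; rw [h]; simp

-- B's unquoted-run step absorbs one leading non-quote character
theorem pvGoB_split (xs : List Char) :
    (xs.takeWhile (fun d => !(d = '\'' || d = '"'))).flatMap pvRepl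
      ++ pvGoB (xs.dropWhile (fun d => !(d = '\'' || d = '"'))) = pvGoB xs := by
  cases xs with
  | nil => simp [pvGoB]
  | cons c xs =>
    by_cases hc : c = '\'' ∨ c = '"'
    · rw [List.takeWhile_cons_of_neg (by rcases hc with h | h <;> simp [h]),
          List.dropWhile_cons_of_neg (by rcases hc with h | h <;> simp [h])]
      simp
    · rw [not_or] at hc
      rw [pvGoB]
      rw [if_neg (by simpa using hc)]

theorem pvGoB_cons (c : Char) (xs : List Char) (h1 : c ≠ '\'') (h2 : c ≠ '"') :
    pvGoB (c :: xs) = pvRepl c ++ pvGoB xs := by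
  rw [pvGoB, if_neg (by simp [h1, h2])]
  rw [List.takeWhile_cons_of_pos (by simp [h1, h2]),
      List.dropWhile_cons_of_pos (by simp [h1, h2])]
  rw [List.flatMap_cons, List.append_assoc, pvGoB_split]

-- the main machine equivalence, by strong induction on the length
theorem pvGo_main : ∀ n (xs : List Char), xs.length ≤ n → pvGoA xs false false = pvGoB xs := by
  intro n
  induction n with
  | zero => intro xs h; rw [List.length_eq_zero_iff.mp (Nat.le_zero.mp h)]; simp [pvGoA, pvGoB]
  | succ n ih =>
    intro xs hlen
    cases xs with
    | nil => simp [pvGoA, pvGoB]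
    | cons c xs =>
      simp only [List.length_cons, Nat.succ_le_succ_iff] at hlen
      by_cases h1 : c = '\''
      · subst h1
        have : pvGoA ('\'' :: xs) false false = '\'' :: pvGoA xs true false := by
          simp [pvGoA]
        have hl := pvTakeLit_len '\'' xs
        rw [this, pvGoA_squote, ih _ (Nat.le_trans hl hlen)]
        conv_rhs => rw [pvGoB]
        simp
      · by_cases h2 : c = '"'
        · subst h2
          have : pvGoA ('"' :: xs) false false = '"' :: pvGoA xs false true := by
            simp [pvGoA]
          have hl := pvTakeLit_len '"' xs
          rw [this, pvGoA_dquote, ih _ (Nat.le_trans hl hlen)]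
          conv_rhs => rw [pvGoB]
          simp
        · rw [pvGoB_cons c xs h1 h2, ← ih xs hlen]
          by_cases hq : c = '?'
          · subst hq; simp [pvGoA, pvRepl]
          · by_cases hp : c = '%'
            · subst hp; simp [pvGoA, pvRepl]
            · simp [pvGoA, pvRepl, h1, h2, hq, hp]

-- ===== VERDICT (by name: the statement is the Claim_ definition above) =====
theorem translate_placeholders_py_spec : Claim_equal_translate_placeholders_py := by
  intro sql _
  unfold Spec_translate_placeholders_py
  cases sql with
  | none => rfl
  | some s =>
    simp only [translate_placeholders_py, translate_placeholders_py_alt]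
    by_cases hg : (!s.toList.contains '?' && !s.toList.contains '%') = true
    · rw [if_pos hg, if_pos hg]
    · rw [if_neg hg, if_neg hg, pvGo_main s.toList.length s.toList (Nat.le_refl _)]
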